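-- pv_equiv track=rewrite | github.com/Midhilesh4890/Leetcode-Problems | Google/Onsite/bombexplosions.py | max_explosion_radii
-- ===== SOURCE A (Python) =====
-- def max_explosion_radii(bombs):
--     """
--     Calculate the maximum total explosion radii by detonating bombs optimally,
--     using a union-find structure to quickly mark intervals of removed bombs.
--
--     Args:
--         bombs (List[int]): List of bomb explosion radii.
--
--     Returns:
--         int: Maximum total explosion radii.
--     """
--     n = len(bombs)
--     total_explosion = 0
--     # Create a union-find array with an extra sentinel index.
--     parent = list(range(n + 1))  # parent[i] is the next unremoved index, parent[n] is a sentinel.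
--
--     def find(x):
--         """
--         Find the representative of x with path compression.
--         This returns the smallest index >= x that has not been removed.
--         """
--         if parent[x] != x:
--             parent[x] = find(parent[x])
--         return parent[x]
--
--     # Sort bombs by explosion radius in descending order along with their indices.
--     indexed_bombs = sorted(enumerate(bombs), key=lambda x: -x[1])
--
--     for i, radius in indexed_bombs:
--         # If bomb i is already removed, skip it.
--         if find(i) != i:
--             continue
--
--         # Detonate this bomb.
--         total_explosion += radius
--
--         # Determine the explosion interval [L, R).
--         L = max(0, i - radius)
--         R = min(n, i + radius + 1)
--
--         # Use union-find to mark all indices in [L, R) as removed.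
--         j = find(L)
--         while j < R:
--             parent[j] = find(j + 1)  # Link j to the next unremoved index.
--             j = parent[j]
--
--     return total_explosion
-- ===== SOURCE B (Python) =====
-- def max_explosion_radii(bombs):
--     """
--     Calculate the maximum total explosion radii by detonating bombs greedily
--     (largest radius first), marking destroyed bombs in a boolean array.
--     """
--     n = len(bombs)
--     removed = [False] * n
--     total_explosion = 0
--     for i, radius in sorted(enumerate(bombs), key=lambda x: -x[1]):
--         if removed[i]:
--             continue
--         total_explosion += radius
--         for j in range(max(0, i - radius), min(n, i + radius + 1)):
--             removed[j] = True
--     return total_explosion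
-- ===== Notes on version B (the rewrite author's own statement) =====
-- stated objective: simpler
-- what changed: Replaces the union-find parent array with path compression and skip-chasing while-loop by a plain boolean removed array: each detonation marks its interval with one flat range loop and the skip test is a direct removed[i] lookup.
-- outside the precondition, e.g. on max_explosion_radii([3, -2]): A returns 3, B returns 3
import Mathlib
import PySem

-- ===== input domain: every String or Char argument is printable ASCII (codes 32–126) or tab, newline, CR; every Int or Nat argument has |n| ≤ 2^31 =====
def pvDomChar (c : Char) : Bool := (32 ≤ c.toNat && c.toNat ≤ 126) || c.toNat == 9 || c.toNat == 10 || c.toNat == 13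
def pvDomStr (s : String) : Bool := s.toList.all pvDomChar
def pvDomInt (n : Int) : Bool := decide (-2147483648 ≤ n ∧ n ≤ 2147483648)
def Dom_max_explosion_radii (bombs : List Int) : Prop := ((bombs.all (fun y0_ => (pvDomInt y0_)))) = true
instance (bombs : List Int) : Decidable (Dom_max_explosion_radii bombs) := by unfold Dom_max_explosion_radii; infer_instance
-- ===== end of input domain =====

-- B replaces A's union-find parent array (recursive find with path compression + skip-chasing
-- while loop) by a plain boolean removed-array with a flat range-marking loop; objective: simpler.


-- ===== PORT A =====
-- find(x) with path compression.  The fuel argument is only a totality guard: under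
-- Pre_ the parent chain is strictly increasing and bounded by n, so fuel n+1 never runs out.
def pvFindA (fuel : Nat) (parent : List Int) (x : Int) : Int × List Int :=
  match fuel with
  | 0 => (x, parent)
  | f + 1 =>
    let px := PySem.List.pyGetD parent x 0
    if px ≠ x then
      let r := pvFindA f parent px
      (r.1, PySem.List.pySetD r.2 x r.1)
    else (x, parent)

-- the 'while j < R' marking loop; fuel is again only a totality guard (j strictly increases).
def pvMarkA (n : Nat) (fuel : Nat) (parent : List Int) (j R : Int) : List Int :=
  match fuel with
  | 0 => parent
  | f + 1 =>
    if j < R then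
      let t := pvFindA (n + 1) parent (j + 1)
      pvMarkA n f (PySem.List.pySetD t.2 j t.1) t.1 R
    else parent

-- body of A's 'for i, radius in indexed_bombs' loop
def pvStepA (n : Nat) (st : Int × List Int) (p : Int × Int) : Int × List Int :=
  let fi := pvFindA (n + 1) st.2 p.1
  if fi.1 ≠ p.1 then (st.1, fi.2)
  else
    let L := max 0 (p.1 - p.2)
    let R := min (n : Int) (p.1 + p.2 + 1)
    let fL := pvFindA (n + 1) fi.2 L
    (st.1 + p.2, pvMarkA n (n + 1) fL.2 fL.1 R)

def max_explosion_radii (bombs : List Int) : Int :=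
  let n := bombs.length
  ((PySem.List.sorted (PySem.List.enumerate bombs) (fun x => -x.2) false).foldl
    (pvStepA n) (0, PySem.List.pyRange 0 ((n : Int) + 1) 1)).1

-- ===== PORT B =====
-- 'for j in range(max(0, i - radius), min(n, i + radius + 1)): removed[j] = True'
def pvMarkRange (removed : List Bool) (L R : Int) : List Bool :=
  (PySem.List.pyRange L R 1).foldl (fun acc j => PySem.List.pySetD acc j true) removed

-- body of B's for loop
def pvStepB (n : Nat) (st : Int × List Bool) (p : Int × Int) : Int × List Bool :=
  if PySem.List.pyGetD st.2 p.1 false then st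
  else (st.1 + p.2, pvMarkRange st.2 (max 0 (p.1 - p.2)) (min (n : Int) (p.1 + p.2 + 1)))

def max_explosion_radii_alt (bombs : List Int) : Int :=
  let n := bombs.length
  ((PySem.List.sorted (PySem.List.enumerate bombs) (fun x => -x.2) false).foldl
    (pvStepB n) (0, List.replicate n false)).1

-- ===== PRECONDITION & SPEC =====
-- A evaluates parent[i - radius]; this raises IndexError when i - bombs[i] > n for a bomb i that
-- is still active when processed.  Pre_ excludes every input with i - bombs[i] > n; on a few of
-- those A happens to return anyway because a larger bomb removes bomb i first (see cites).
def Pre_max_explosion_radii (bombs : List Int) : Prop :=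
  ∀ p ∈ PySem.List.enumerate bombs, p.1 - p.2 ≤ (bombs.length : Int)
instance (bombs : List Int) : Decidable (Pre_max_explosion_radii bombs) := by
  unfold Pre_max_explosion_radii; infer_instance
def pvWitness_max_explosion_radii : List Int := [2, 1]

def Spec_max_explosion_radii (bombs : List Int) (out : Int) : Prop := out = max_explosion_radii_alt bombs
instance (bombs : List Int) (out : Int) : Decidable (Spec_max_explosion_radii bombs out) := by unfold Spec_max_explosion_radii; infer_instance

-- ===== CLAIM (what is proved, stated in full; the proofs are below) =====
def Claim_equal_max_explosion_radii : Prop := ∀ (bombs : List Int), Dom_max_explosion_radii bombs → Pre_max_explosion_radii bombs → Spec_max_explosion_radii bombs (max_explosion_radii bombs)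

-- ===== LEMMAS AND PROOFS =====

def pvNxt (removed : List Bool) (x : Nat) : Nat :=
  if h : x < removed.length then
    if removed[x] then pvNxt removed (x + 1) else x
  else x
termination_by removed.length - x

lemma pvNxt_le (removed : List Bool) (x : Nat) (hx : x ≤ removed.length) :
    pvNxt removed x ≤ removed.length := by
  induction x using pvNxt.induct removed with
  | case1 x h hr ih => rw [pvNxt]; simp [h, hr]; exact ih (by omega)
  | case2 x h hr => rw [pvNxt]; simp [h, hr]; omega
  | case3 x h => rw [pvNxt]; simp [h]; omega

lemma le_pvNxt (removed : List Bool) (x : Nat) : x ≤ pvNxt removed x := by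
  induction x using pvNxt.induct removed with
  | case1 x h hr ih => rw [pvNxt]; simp [h, hr]; omega
  | case2 x h hr => rw [pvNxt]; simp [h, hr]
  | case3 x h => rw [pvNxt]; simp [h]

lemma pvNxt_removed_lt (removed : List Bool) (x y : Nat) (hxy : x ≤ y)
    (hy : y < pvNxt removed x) : removed.getD y false = true := by
  induction x using pvNxt.induct removed with
  | case1 x h hr ih =>
    rw [pvNxt] at hy; simp [h, hr] at hy
    rcases Nat.eq_or_lt_of_le hxy with rfl | hlt
    · rw [List.getD_eq_getElem removed false h]; exact hr
    · exact ih hlt hy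
  | case2 x h hr => rw [pvNxt] at hy; simp [h, hr] at hy; omega
  | case3 x h => rw [pvNxt] at hy; simp [h] at hy; omega

lemma pvNxt_eq_of_false (removed : List Bool) (x : Nat)
    (h : removed.getD x false = false) : pvNxt removed x = x := by
  rw [pvNxt]
  by_cases hx : x < removed.length
  · rw [List.getD_eq_getElem removed false hx] at h; simp [hx, h]
  · simp [hx]

lemma pvNxt_lt_of_true (removed : List Bool) (x : Nat)
    (h : removed.getD x false = true) : x < pvNxt removed x := by
  have hx : x < removed.length := by
    by_contra hc
    rw [List.getD_eq_default removed false (by omega)] at h; exact absurd h (by simp)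
  have hb : removed[x] = true := by rwa [List.getD_eq_getElem removed false hx] at h
  rw [pvNxt]; simp [hx, hb]
  have := le_pvNxt removed (x + 1); omega

lemma pvNxt_eq_of_removed_between (removed : List Bool) (x m : Nat) (hxm : x ≤ m)
    (h : ∀ y : Nat, x ≤ y → y < m → removed.getD y false = true) :
    pvNxt removed x = pvNxt removed m := by
  induction x using pvNxt.induct removed with
  | case1 x hx hr ih =>
    rcases Nat.eq_or_lt_of_le hxm with rfl | hlt
    · rfl
    · rw [pvNxt]; simp [hx, hr]
      exact ih hlt (fun y hy1 hy2 => h y (by omega) hy2)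
  | case2 x hx hr =>
    rcases Nat.eq_or_lt_of_le hxm with rfl | hlt
    · rfl
    · have hx2 := h x (le_refl _) hlt
      rw [List.getD_eq_getElem removed false hx] at hx2
      simp [hx2] at hr
  | case3 x hx =>
    rcases Nat.eq_or_lt_of_le hxm with rfl | hlt
    · rfl
    · have hx2 := h x (le_refl _) hlt
      rw [List.getD_eq_default removed false (by omega)] at hx2
      exact absurd hx2 (by simp)

lemma pvGetD_set_ne' {α : Type} (l : List α) (x j : Nat) (v d : α) (h : j ≠ x) :
    (l.set j v).getD x d = l.getD x d := by
  simp [List.getD_eq_getElem?_getD, List.getElem?_set_ne h]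

lemma pvGetD_set_self {α : Type} (l : List α) (x : Nat) (v d : α) (h : x < l.length) :
    (l.set x v).getD x d = v := by
  rw [List.getD_eq_getElem (l.set x v) d (by simpa using h)]
  simp [List.getElem_set_self]

lemma pvSet_true_mono (removed : List Bool) (j y : Nat)
    (h : removed.getD y false = true) : (removed.set j true).getD y false = true := by
  by_cases hjy : j = y
  · subst hjy
    have hy : j < removed.length := by
      by_contra hc
      rw [List.getD_eq_default removed false (by omega)] at h; exact absurd h (by simp)
    exact pvGetD_set_self removed j true false hy
  · rw [pvGetD_set_ne' removed y j true false hjy]; exact h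

lemma pvTrue_lt (removed : List Bool) (x : Nat) (h : removed.getD x false = true) :
    x < removed.length := by
  by_contra hc
  rw [List.getD_eq_default removed false (by omega)] at h; exact absurd h (by simp)

def pvRel (parent : List Int) (removed : List Bool) : Prop :=
  parent.length = removed.length + 1 ∧
  ∀ x : Nat, x ≤ removed.length →
    (removed.getD x false = false → parent.getD x 0 = (x : Int)) ∧
    (removed.getD x false = true →
      (x : Int) < parent.getD x 0 ∧ parent.getD x 0 ≤ (removed.length : Int) ∧
      ∀ y : Nat, x ≤ y → (y : Int) < parent.getD x 0 → removed.getD y false = true)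

lemma pvRel_set_nxt (parent : List Int) (removed : List Bool) (x : Nat)
    (hrel : pvRel parent removed) (hx : removed.getD x false = true) :
    pvRel (parent.set x (pvNxt removed x : Int)) removed := by
  obtain ⟨hlen, hinv⟩ := hrel
  have hxlen : x < removed.length := pvTrue_lt removed x hx
  refine ⟨by simp [hlen], fun x' hx' => ?_⟩
  by_cases hxx : x' = x
  · subst hxx
    have hp : (parent.set x' (pvNxt removed x' : Int)).getD x' 0 = (pvNxt removed x' : Int) :=
      pvGetD_set_self parent x' _ 0 (by omega)
    refine ⟨fun hf => by rw [hf] at hx; exact Bool.noConfusion hx, fun _ => ?_⟩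
    rw [hp]
    refine ⟨by exact_mod_cast pvNxt_lt_of_true removed x' hx,
      by exact_mod_cast pvNxt_le removed x' (by omega), fun y hy1 hy2 => ?_⟩
    exact pvNxt_removed_lt removed x' y hy1 (by exact_mod_cast hy2)
  · have hp : (parent.set x (pvNxt removed x : Int)).getD x' 0 = parent.getD x' 0 :=
      pvGetD_set_ne' parent x' x _ 0 (fun h => hxx h.symm)
    rw [hp]; exact hinv x' hx'

lemma pvRel_set_true (parent : List Int) (removed : List Bool) (j : Nat)
    (hrel : pvRel parent removed) (hj : j < removed.length) :
    pvRel (parent.set j (pvNxt removed (j + 1) : Int)) (removed.set j true) := by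
  obtain ⟨hlen, hinv⟩ := hrel
  refine ⟨by simp [hlen], fun x hx => ?_⟩
  rw [List.length_set] at hx
  by_cases hxj : x = j
  · subst hxj
    have hr' : (removed.set x true).getD x false = true := pvGetD_set_self removed x true false hj
    have hp : (parent.set x (pvNxt removed (x + 1) : Int)).getD x 0 = (pvNxt removed (x + 1) : Int) :=
      pvGetD_set_self parent x _ 0 (by omega)
    refine ⟨fun hf => by rw [hf] at hr'; exact Bool.noConfusion hr', fun _ => ?_⟩
    rw [hp]
    have h1 : x + 1 ≤ pvNxt removed (x + 1) := le_pvNxt removed (x + 1)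
    have h2 : pvNxt removed (x + 1) ≤ removed.length := pvNxt_le removed (x + 1) (by omega)
    refine ⟨by exact_mod_cast h1, by simp; exact_mod_cast h2, fun y hy1 hy2 => ?_⟩
    by_cases hyx : y = x
    · subst hyx; exact hr'
    · exact pvSet_true_mono removed x y
        (pvNxt_removed_lt removed (x + 1) y (by omega) (by exact_mod_cast hy2))
  · have hp : (parent.set j (pvNxt removed (j + 1) : Int)).getD x 0 = parent.getD x 0 :=
      pvGetD_set_ne' parent x j _ 0 (fun h => hxj h.symm)
    have hr' : (removed.set j true).getD x false = removed.getD x false :=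
      pvGetD_set_ne' removed x j true false (fun h => hxj h.symm)
    rw [hp, hr']
    obtain ⟨h1, h2⟩ := hinv x hx
    refine ⟨h1, fun ht => ?_⟩
    obtain ⟨h3, h4, h5⟩ := h2 ht
    exact ⟨h3, by simpa using h4, fun y hy1 hy2 => pvSet_true_mono removed j y (h5 y hy1 hy2)⟩

lemma pvFindA_spec (fuel : Nat) (parent : List Int) (removed : List Bool) (x : Nat)
    (hrel : pvRel parent removed) (hx : x ≤ removed.length)
    (hfuel : removed.length - x < fuel) :
    (pvFindA fuel parent (x : Int)).1 = (pvNxt removed x : Int) ∧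
      pvRel (pvFindA fuel parent (x : Int)).2 removed := by
  induction fuel generalizing parent x with
  | zero => omega
  | succ f ih =>
    have hpx : PySem.List.pyGetD parent (x : Int) 0 = parent.getD x 0 :=
      PySem.List.pyGetD_natCast parent x 0
    by_cases hrx : removed.getD x false = true
    · -- removed: parent points strictly forward
      obtain ⟨h1, h2, h3⟩ := (hrel.2 x hx).2 hrx
      have hxlen := pvTrue_lt removed x hrx
      set p := parent.getD x 0 with hpdef
      have hp0 : 0 ≤ p := by omega
      have hxn : p = ((p.toNat : Nat) : Int) := by omega
      have hxn1 : x + 1 ≤ p.toNat := by omega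
      have hxn2 : p.toNat ≤ removed.length := by omega
      have ihr := ih parent p.toNat hrel hxn2 (by omega)
      have hnxt : pvNxt removed x = pvNxt removed p.toNat :=
        pvNxt_eq_of_removed_between removed x p.toNat (by omega)
          (fun y hy1 hy2 => h3 y hy1 (by omega))
      obtain ⟨ih1, ih2⟩ := ihr
      rw [← hxn] at ih1 ih2
      simp only [pvFindA, hpx]
      split_ifs with hcond
      · constructor
        · simpa [ih1] using congrArg (fun m => ((m : Nat) : Int)) hnxt.symm
        · simp only [PySem.List.pySetD_natCast]
          rw [ih1, ← hnxt]
          exact pvRel_set_nxt _ removed x ih2 hrx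
      · omega
    · -- not removed: parent is its own parent, find returns immediately
      have hrx' : removed.getD x false = false := by
        cases h : removed.getD x false with
        | true => exact absurd h hrx
        | false => rfl
      have hself : parent.getD x 0 = (x : Int) := (hrel.2 x hx).1 hrx'
      rw [pvFindA]
      simp only [hpx, hself, ne_eq, not_true_eq_false, if_false]
      simp [pvNxt_eq_of_false removed x hrx', hrel]

lemma pvSet_true_id (l : List Bool) (i : Nat) (h : l.getD i false = true) :
    l.set i true = l := by
  have hi : i < l.length := pvTrue_lt l i h
  apply List.ext_getElem (by simp)
  intro k hk1 hk2
  rw [List.getElem_set]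
  split_ifs with hik
  · subst hik; rw [List.getD_eq_getElem l false hi] at h; exact h.symm
  · rfl

lemma pvMarkRange_cons (removed : List Bool) (j R : Int) (h : j < R) :
    pvMarkRange removed j R = pvMarkRange (PySem.List.pySetD removed j true) (j + 1) R := by
  unfold pvMarkRange
  rw [PySem.List.pyRange_one_cons h]
  rfl

lemma pvMarkRange_nil (removed : List Bool) (j R : Int) (h : R ≤ j) :
    pvMarkRange removed j R = removed := by
  unfold pvMarkRange
  rw [PySem.List.pyRange_one_eq_nil h]
  rfl

lemma pvMarkRange_length (removed : List Bool) (L R : Int) :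
    (pvMarkRange removed L R).length = removed.length := by
  unfold pvMarkRange
  generalize PySem.List.pyRange L R 1 = l
  induction l generalizing removed with
  | nil => rfl
  | cons a l ih => simp only [List.foldl_cons]; rw [ih]; exact PySem.List.length_pySetD _ _ _

lemma pvMarkRange_skip (removed : List Bool) (a m R : Int) (ha : 0 ≤ a) (ham : a ≤ m)
    (h : ∀ y : Nat, a ≤ (y : Int) → (y : Int) < m → removed.getD y false = true) :
    pvMarkRange removed a R = pvMarkRange removed m R := by
  suffices H : ∀ (k : Nat) (a : Int), 0 ≤ a → a ≤ m → (m - a).toNat ≤ k →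
      (∀ y : Nat, a ≤ (y : Int) → (y : Int) < m → removed.getD y false = true) →
      pvMarkRange removed a R = pvMarkRange removed m R by
    exact H (m - a).toNat a ha ham (le_refl _) h
  intro k
  induction k with
  | zero =>
    intro a ha ham hk _
    have : a = m := by omega
    rw [this]
  | succ k ih =>
    intro a ha ham hk h
    rcases eq_or_lt_of_le ham with rfl | hlt
    · rfl
    · have hat : a = ((a.toNat : Nat) : Int) := by omega
      have ha' : removed.getD a.toNat false = true := h a.toNat (by omega) (by omega)
      by_cases hR : a < R
      · rw [pvMarkRange_cons removed a R hR]
        rw [PySem.List.pySetD_of_nonneg removed true ha, pvSet_true_id removed a.toNat ha']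
        exact ih (a + 1) (by omega) (by omega) (by omega) (fun y hy1 hy2 => h y (by omega) hy2)
      · rw [pvMarkRange_nil removed a R (by omega), pvMarkRange_nil removed m R (by omega)]

lemma pvMarkA_spec (fuel : Nat) (parent : List Int) (removed : List Bool) (j R : Int)
    (hrel : pvRel parent removed) (hj : 0 ≤ j) (hR : R ≤ (removed.length : Int))
    (hfuel : (R - j).toNat < fuel) :
    pvRel (pvMarkA removed.length fuel parent j R) (pvMarkRange removed j R) := by
  induction fuel generalizing parent removed j with
  | zero => omega
  | succ f ih =>
    simp only [pvMarkA]
    split_ifs with hjR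
    · -- one iteration of the while loop
      have hj1 : (j + 1) = ((j.toNat + 1 : Nat) : Int) := by omega
      have hfs := pvFindA_spec (removed.length + 1) parent removed (j.toNat + 1) hrel
        (by omega) (by omega)
      rw [← hj1] at hfs
      obtain ⟨hf1, hf2⟩ := hfs
      set t := pvFindA (removed.length + 1) parent (j + 1) with ht
      have hjlen : j.toNat < removed.length := by omega
      have hset : PySem.List.pySetD t.2 j t.1 = t.2.set j.toNat t.1 :=
        PySem.List.pySetD_of_nonneg t.2 t.1 hj
      have hrel2 : pvRel (t.2.set j.toNat t.1) (removed.set j.toNat true) := by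
        rw [hf1]; exact pvRel_set_true t.2 removed j.toNat hf2 hjlen
      have hlen2 : (removed.set j.toNat true).length = removed.length := by simp
      have ht1 : t.1 = ((pvNxt removed (j.toNat + 1) : Nat) : Int) := hf1
      have hjt : j + 1 ≤ t.1 := by
        rw [ht1]; have := le_pvNxt removed (j.toNat + 1); omega
      have ihr := ih (t.2.set j.toNat t.1) (removed.set j.toNat true) t.1
        hrel2 (by omega) (by rw [hlen2]; exact hR) (by omega)
      rw [hlen2] at ihr
      rw [hset]
      have hmr : pvMarkRange removed j R
          = pvMarkRange (removed.set j.toNat true) t.1 R := by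
        rw [pvMarkRange_cons removed j R hjR,
          PySem.List.pySetD_of_nonneg removed true hj]
        refine pvMarkRange_skip (removed.set j.toNat true) (j + 1) t.1 R (by omega) hjt ?_
        intro y hy1 hy2
        have hyj : j.toNat ≠ y := by omega
        rw [pvGetD_set_ne' removed y j.toNat true false hyj]
        refine pvNxt_removed_lt removed (j.toNat + 1) y (by omega) ?_
        rw [ht1] at hy2; exact_mod_cast hy2
      rw [hmr]
      exact ihr
    · rw [pvMarkRange_nil removed j R (by omega)]
      exact hrel

lemma pvStepB_length (n : Nat) (st : Int × List Bool) (p : Int × Int) :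
    (pvStepB n st p).2.length = st.2.length := by
  unfold pvStepB
  split_ifs with h
  · rfl
  · exact pvMarkRange_length _ _ _

lemma pvStep_eq (parent : List Int) (removed : List Bool) (total : Int) (i r : Int)
    (hrel : pvRel parent removed) (hi0 : 0 ≤ i) (hin : i < (removed.length : Int))
    (hir : i - r ≤ (removed.length : Int)) :
    (pvStepA removed.length (total, parent) (i, r)).1
        = (pvStepB removed.length (total, removed) (i, r)).1 ∧
      pvRel (pvStepA removed.length (total, parent) (i, r)).2
        (pvStepB removed.length (total, removed) (i, r)).2 := by
  have hit : (i : Int) = ((i.toNat : Nat) : Int) := by omega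
  have hfs := pvFindA_spec (removed.length + 1) parent removed i.toNat hrel (by omega) (by omega)
  rw [← hit] at hfs
  obtain ⟨hf1, hf2⟩ := hfs
  by_cases hrm : removed.getD i.toNat false = true
  · -- bomb i already removed: both sides skip
    have hlt : i.toNat < pvNxt removed i.toNat := pvNxt_lt_of_true removed i.toNat hrm
    have hne : (pvFindA (removed.length + 1) parent i).1 ≠ i := by rw [hf1]; omega
    have hB : PySem.List.pyGetD removed i false = true := by
      rw [hit, PySem.List.pyGetD_natCast]; exact hrm
    simp only [pvStepA, pvStepB]
    rw [if_pos hne, if_pos hB]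
    exact ⟨rfl, hf2⟩
  · -- bomb i detonates; both sides mark [L, R)
    have hrm' : removed.getD i.toNat false = false := by
      cases h : removed.getD i.toNat false with
      | true => exact absurd h hrm
      | false => rfl
    have hfi : (pvFindA (removed.length + 1) parent i).1 = i := by
      rw [hf1, pvNxt_eq_of_false removed i.toNat hrm']; omega
    have hB : PySem.List.pyGetD removed i false = false := by
      rw [hit, PySem.List.pyGetD_natCast]; exact hrm'
    have hLt : max 0 (i - r) = (((max 0 (i - r)).toNat : Nat) : Int) := by omega
    have hLs := pvFindA_spec (removed.length + 1) (pvFindA (removed.length + 1) parent i).2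
      removed (max 0 (i - r)).toNat hf2 (by omega) (by omega)
    rw [← hLt] at hLs
    obtain ⟨hL1, hL2⟩ := hLs
    set fL := pvFindA (removed.length + 1) (pvFindA (removed.length + 1) parent i).2
      (max 0 (i - r)) with hfL
    have hfL0 : 0 ≤ fL.1 := by rw [hL1]; omega
    have hma := pvMarkA_spec (removed.length + 1) fL.2 removed fL.1
      (min (removed.length : Int) (i + r + 1)) hL2 hfL0 (by omega) (by omega)
    have hmr : pvMarkRange removed (max 0 (i - r)) (min (removed.length : Int) (i + r + 1))
        = pvMarkRange removed fL.1 (min (removed.length : Int) (i + r + 1)) := by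
      refine pvMarkRange_skip removed (max 0 (i - r)) fL.1 _ (by omega) ?_ ?_
      · rw [hL1]; have := le_pvNxt removed (max 0 (i - r)).toNat; omega
      · intro y hy1 hy2
        refine pvNxt_removed_lt removed (max 0 (i - r)).toNat y (by omega) ?_
        rw [hL1] at hy2; exact_mod_cast hy2
    simp only [pvStepA, pvStepB]
    rw [if_neg (by rw [hfi]; exact fun h => h rfl), if_neg (by rw [hB]; exact Bool.false_ne_true)]
    exact ⟨rfl, by rw [hmr]; exact hma⟩

lemma pvFold_eq (S : List (Int × Int)) (total : Int) (parent : List Int) (removed : List Bool)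
    (hrel : pvRel parent removed)
    (hS : ∀ p ∈ S, 0 ≤ p.1 ∧ p.1 < (removed.length : Int) ∧ p.1 - p.2 ≤ (removed.length : Int)) :
    (S.foldl (pvStepA removed.length) (total, parent)).1
      = (S.foldl (pvStepB removed.length) (total, removed)).1 := by
  induction S generalizing total parent removed with
  | nil => rfl
  | cons p S ih =>
    obtain ⟨pa, pb⟩ := p
    obtain ⟨hp0, hp1, hp2⟩ := hS (pa, pb) (List.mem_cons_self ..)
    have hstep := pvStep_eq parent removed total pa pb hrel hp0 hp1 hp2
    obtain ⟨h1, h2⟩ := hstep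
    have hlen : (pvStepB removed.length (total, removed) (pa, pb)).2.length = removed.length :=
      pvStepB_length _ _ _
    have hrec := ih (pvStepB removed.length (total, removed) (pa, pb)).1
      (pvStepA removed.length (total, parent) (pa, pb)).2
      (pvStepB removed.length (total, removed) (pa, pb)).2
      (by simpa [hlen] using h2)
      (by rw [hlen]; exact fun q hq => hS q (List.mem_cons_of_mem (pa, pb) hq))
    rw [hlen] at hrec
    simp only [List.foldl_cons]
    calc (S.foldl (pvStepA removed.length) (pvStepA removed.length (total, parent) (pa, pb))).1
        = (S.foldl (pvStepA removed.length)
            ((pvStepB removed.length (total, removed) (pa, pb)).1,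
             (pvStepA removed.length (total, parent) (pa, pb)).2)).1 := by
          rw [← h1]
      _ = (S.foldl (pvStepB removed.length)
            ((pvStepB removed.length (total, removed) (pa, pb)).1,
             (pvStepB removed.length (total, removed) (pa, pb)).2)).1 := hrec
      _ = (S.foldl (pvStepB removed.length) (pvStepB removed.length (total, removed) (pa, pb))).1 := by
          rw [Prod.mk.eta]

-- ===== VERDICT (by name: the statement is the Claim_ definition above) =====
theorem max_explosion_radii_spec : Claim_equal_max_explosion_radii := by
  intro bombs _ hpre
  unfold Spec_max_explosion_radii
  simp only [max_explosion_radii, max_explosion_radii_alt]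
  have hrep : ∀ y : Nat, (List.replicate bombs.length false).getD y false = false := by
    intro y
    by_cases hy : y < bombs.length
    · rw [List.getD_eq_getElem _ false (by simpa using hy)]; simp
    · rw [List.getD_eq_default _ false (by simpa using hy)]
  have hrel0 : pvRel (PySem.List.pyRange 0 ((bombs.length : Int) + 1) 1)
      (List.replicate bombs.length false) := by
    constructor
    · rw [PySem.List.length_pyRange_one]; simp
    · intro x hx
      rw [List.length_replicate] at hx
      have hxlt : x < (PySem.List.pyRange 0 ((bombs.length : Int) + 1) 1).length := by
        rw [PySem.List.length_pyRange_one]; omega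
      have hpar : (PySem.List.pyRange 0 ((bombs.length : Int) + 1) 1).getD x 0 = (x : Int) := by
        rw [List.getD_eq_getElem _ 0 hxlt, PySem.List.getElem_pyRange_one]
        omega
      exact ⟨fun _ => hpar, fun ht => absurd (hrep x) (by rw [ht]; exact Bool.noConfusion)⟩
  have hS : ∀ p ∈ PySem.List.sorted (PySem.List.enumerate bombs) (fun x => -x.2) false,
      0 ≤ p.1 ∧ p.1 < ((List.replicate bombs.length false).length : Int) ∧
        p.1 - p.2 ≤ ((List.replicate bombs.length false).length : Int) := by
    intro p hp
    rw [PySem.List.mem_sorted] at hp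
    obtain ⟨k, hk, hpk⟩ := (PySem.List.mem_enumerate_iff bombs 0 p).1 hp
    have h3 := hpre p hp
    subst hpk
    simp only [List.length_replicate]
    exact ⟨by omega, by simp; exact_mod_cast hk, by simpa using h3⟩
  have h := pvFold_eq (PySem.List.sorted (PySem.List.enumerate bombs) (fun x => -x.2) false)
    0 (PySem.List.pyRange 0 ((bombs.length : Int) + 1) 1)
    (List.replicate bombs.length false) hrel0 hS
  simpa using h
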